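-- pv_equiv track=rewrite | github.com/Jeffrey-love/Boring_Homework | 密码编码学_实验/PlayFairl.py | message_to_digraphs
-- ===== SOURCE A (Python) =====
-- def message_to_digraphs(message_original):
--     # 转换为列表
--     message1 = []
--     for e in message_original:
--         message1.append(e)
--     for unused in range(len(message1)):
--         if " " in message1:
--             message1.remove(" ")
--
--     # 两位数相同则加一个X
--     i = 0
--     for e in range(int(len(message1) / 2)):
--         if message1[i] == message1[i + 1]:
--             message1.insert(i + 1, 'X')
--         i = i + 2
--
--     # 奇数位加X
--     if len(message1) % 2 == 1:
--         message1.append("X")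
--     i = 0
--     new = []
--     for x in range(1, int(len(message1) / 2 + 1)):
--         new.append(message1[i:i + 2])   # 两两分组
--         i = i + 2
--     return new
-- ===== SOURCE B (Python) =====
-- def message_to_digraphs(message_original):
--     # Single pass: filter spaces once, then emit the digraph stream left to right
--     # (no in-place insert/remove), pad, and chunk into pairs.
--     chars = [c for c in message_original if c != " "]
--     out = []
--     i = 0
--     for _ in range(len(chars) // 2):
--         if chars[i] == chars[i + 1]:
--             out.append(chars[i])
--             out.append("X")
--             i += 1
--         else:
--             out.append(chars[i])
--             out.append(chars[i + 1])
--             i += 2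
--     out.extend(chars[i:])
--     if len(out) % 2 == 1:
--         out.append("X")
--     pairs = []
--     j = 0
--     while j < len(out):
--         pairs.append(out[j:j + 2])
--         j += 2
--     return pairs
-- ===== Notes on version B (the rewrite author's own statement) =====
-- stated objective: faster
-- what changed: Replaces the quadratic remove-spaces loop and in-place list.insert digraph pass with a single linear pass that filters once and builds the output stream with a moving index, never mutating in the middle of a list.
import Mathlib
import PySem

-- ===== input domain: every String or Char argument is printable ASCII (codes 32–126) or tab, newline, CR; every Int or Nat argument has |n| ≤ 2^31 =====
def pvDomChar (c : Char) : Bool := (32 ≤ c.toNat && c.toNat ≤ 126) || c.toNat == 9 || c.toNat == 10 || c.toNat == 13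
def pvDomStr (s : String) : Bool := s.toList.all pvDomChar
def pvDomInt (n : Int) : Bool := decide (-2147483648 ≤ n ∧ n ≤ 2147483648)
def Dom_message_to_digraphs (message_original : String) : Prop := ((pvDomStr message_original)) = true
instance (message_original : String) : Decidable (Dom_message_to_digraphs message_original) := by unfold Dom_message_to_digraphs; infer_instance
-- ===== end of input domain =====

-- B replaces A's quadratic remove/insert list mutation with one linear filter-and-emit pass; return values proved equal.

-- ===== PORT A =====
-- 'for unused in range(len(message1)): if " " in message1: message1.remove(" ")' (counted loop, fuel = initial length)
def pvRmLoop : Nat → List String → List String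
  | 0, l => l
  | k + 1, l => pvRmLoop k (if " " ∈ l then (PySem.List.remove? l " ").getD l else l)

-- 'for e in range(int(len(message1)/2)): if message1[i]==message1[i+1]: insert(i+1,"X"); i += 2'
-- message1[i], message1[i+1]: indices are always in range on the states this loop reaches (proved below), so getD is exact.
def pvAIns : Nat → Nat → List String → List String
  | 0, _, l => l
  | k + 1, i, l =>
      pvAIns k (i + 2)
        (if l.getD i "" == l.getD (i + 1) "" then PySem.List.insert l ((i + 1 : Nat) : Int) "X" else l)

-- 'for x in range(1, int(len/2 + 1)): new.append(message1[i:i+2]); i += 2'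
def pvAGrp : Nat → Nat → List String → List (List String)
  | 0, _, _ => []
  | k + 1, i, l =>
      PySem.List.slice l (some ((i : Nat) : Int)) (some ((i + 2 : Nat) : Int)) :: pvAGrp k (i + 2) l

def message_to_digraphs (message_original : String) : List (List String) :=
  let message1 := message_original.toList.foldl (fun acc c => acc ++ [String.ofList [c]]) []
  let message1 := pvRmLoop message1.length message1
  let message1 := pvAIns (message1.length / 2) 0 message1
  let message1 := if message1.length % 2 == 1 then message1 ++ ["X"] else message1
  pvAGrp (message1.length / 2) 0 message1

-- ===== PORT B =====
-- B's single emitting pass: 'for _ in range(len(chars)//2): …' then 'out.extend(chars[i:])'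
def pvBLoop (chars : List String) : Nat → List String → Nat → List String
  | 0, out, i => out ++ PySem.List.slice chars (some ((i : Nat) : Int)) none
  | k + 1, out, i =>
      if chars.getD i "" == chars.getD (i + 1) "" then
        pvBLoop chars k (out ++ [chars.getD i "", "X"]) (i + 1)
      else
        pvBLoop chars k (out ++ [chars.getD i "", chars.getD (i + 1) ""]) (i + 2)

-- B's chunking while-loop: 'while j < len(out): pairs.append(out[j:j+2]); j += 2'
def pvChunk2 : List String → List (List String)
  | [] => []
  | [a] => [[a]]
  | a :: b :: t => [a, b] :: pvChunk2 t

def message_to_digraphs_alt (message_original : String) : List (List String) :=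
  let chars := (message_original.toList.map (fun c => String.ofList [c])).filter (fun s => s ≠ " ")
  let out := pvBLoop chars (chars.length / 2) [] 0
  let out := if out.length % 2 == 1 then out ++ ["X"] else out
  pvChunk2 out

-- ===== PRECONDITION & SPEC =====
def Spec_message_to_digraphs (message_original : String) (out : List (List String)) : Prop := out = message_to_digraphs_alt message_original
instance (message_original : String) (out : List (List String)) : Decidable (Spec_message_to_digraphs message_original out) := by unfold Spec_message_to_digraphs; infer_instance

-- ===== CLAIM (what is proved, stated in full; the proofs are below) =====
def Claim_equal_message_to_digraphs : Prop := ∀ (message_original : String), Dom_message_to_digraphs message_original → Spec_message_to_digraphs message_original (message_to_digraphs message_original)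

-- ===== LEMMAS AND PROOFS =====

theorem pv_filter_erase (l : List String) (h : " " ∈ l) :
    (l.erase " ").filter (fun s => s ≠ " ") = l.filter (fun s => s ≠ " ") := by
  induction l with
  | nil => cases h
  | cons x t ih =>
    by_cases hx : x = " "
    · subst hx; simp [List.erase_cons_head]
    · have ht : " " ∈ t := by cases h with
        | head => exact absurd rfl hx
        | tail _ h => exact h
      rw [List.erase_cons_tail (by simpa using hx)]
      simp only [List.filter_cons]
      rw [ih ht]

theorem pv_rmLoop_eq_filter (k : Nat) :
    ∀ l : List String, l.count " " ≤ k → pvRmLoop k l = l.filter (fun s => s ≠ " ") := by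
  induction k with
  | zero =>
    intro l h
    have hnm : " " ∉ l := by
      intro hm
      have := List.count_pos_iff.mpr hm
      omega
    rw [pvRmLoop, List.filter_eq_self.mpr]
    intro a ha
    simp only [decide_eq_true_eq]
    intro heq; exact hnm (heq ▸ ha)
  | succ k ih =>
    intro l h
    rw [pvRmLoop]
    by_cases hm : " " ∈ l
    · rw [if_pos hm, PySem.List.remove?_eq_some_erase l " " hm, Option.getD_some]
      rw [ih (l.erase " ") (by
        have hce : List.count " " (l.erase " ") = List.count " " l - 1 := List.count_erase_self
        have hp := List.count_pos_iff.mpr hm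
        omega)]
      exact pv_filter_erase l hm
    · rw [if_neg hm]
      exact ih l (by
        have : l.count " " = 0 := by
          simpa using List.count_eq_zero.mpr hm
        omega)

theorem pv_getD_append_length (out : List String) (x : String) (t : List String) (d : String) :
    (out ++ x :: t).getD out.length d = x := by
  induction out with
  | nil => rfl
  | cons a o ih => simpa using ih

theorem pv_getD_append_length_succ (out : List String) (x y : String) (t : List String) (d : String) :
    (out ++ x :: y :: t).getD (out.length + 1) d = y := by
  have := pv_getD_append_length (out ++ [x]) y t d
  simpa [List.append_assoc] using this

theorem pv_getD_eq (l : List String) (i : Nat) (h : i < l.length) (d : String) :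
    l.getD i d = l[i] := by
  simp [List.getD_eq_getElem?_getD, List.getElem?_eq_getElem h]

theorem pv_drop_two (l : List String) (i : Nat) (h : i + 2 ≤ l.length) :
    l.drop i = l[i]'(by omega) :: l[i+1]'(by omega) :: l.drop (i + 2) := by
  rw [List.drop_eq_getElem_cons (by omega), List.drop_eq_getElem_cons (i := i + 1) (by omega)]

theorem pv_main_loop (chars : List String) (k : Nat) :
    ∀ (out : List String) (i : Nat), i + 2 * k ≤ chars.length →
      pvAIns k out.length (out ++ chars.drop i) = pvBLoop chars k out i := by
  induction k with
  | zero =>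
    intro out i _
    rw [pvAIns, pvBLoop, PySem.List.slice_from_natCast]
  | succ k ih =>
    intro out i hlen
    have h2 : i + 2 ≤ chars.length := by omega
    set a := chars[i]'(by omega) with ha
    set b := chars[i+1]'(by omega) with hb
    have hdrop : chars.drop i = a :: b :: chars.drop (i + 2) := pv_drop_two chars i h2
    have hga : chars.getD i "" = a := pv_getD_eq chars i (by omega) ""
    have hgb : chars.getD (i + 1) "" = b := pv_getD_eq chars (i + 1) (by omega) ""
    rw [pvAIns, pvBLoop, hdrop]
    rw [pv_getD_append_length, pv_getD_append_length_succ, hga, hgb]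
    by_cases hab : a = b
    · rw [if_pos (by simp [hab]), if_pos (by simp [hab])]
      have hins : PySem.List.insert (out ++ a :: b :: chars.drop (i + 2))
          (((out.length + 1 : Nat)) : Int) "X" = (out ++ [a, "X"]) ++ chars.drop (i + 1) := by
        rw [PySem.List.insert_natCast _ _ _ (by simp)]
        have ht : (out ++ a :: b :: chars.drop (i + 2)).take (out.length + 1) = out ++ [a] := by
          have : out ++ a :: b :: chars.drop (i + 2) = (out ++ [a]) ++ b :: chars.drop (i + 2) := by
            simp
          rw [this, List.take_left' (by simp)]
        have hd : (out ++ a :: b :: chars.drop (i + 2)).drop (out.length + 1) = b :: chars.drop (i + 2) := by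
          have : out ++ a :: b :: chars.drop (i + 2) = (out ++ [a]) ++ b :: chars.drop (i + 2) := by
            simp
          rw [this, List.drop_left' (by simp)]
        rw [ht, hd]
        have hdb : chars.drop (i + 1) = b :: chars.drop (i + 2) := by
          rw [List.drop_eq_getElem_cons (by omega)]
        rw [hdb]; simp
      rw [hins]
      have := ih (out ++ [a, "X"]) (i + 1) (by omega)
      simpa using this
    · rw [if_neg (by simp [hab]), if_neg (by simp [hab])]
      have : out ++ a :: b :: chars.drop (i + 2) = (out ++ [a, b]) ++ chars.drop (i + 2) := by simp
      rw [this]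
      have := ih (out ++ [a, b]) (i + 2) (by omega)
      simpa using this

theorem pv_grp_eq_chunk (k : Nat) :
    ∀ (i : Nat) (l : List String), i + 2 * k = l.length → pvAGrp k i l = pvChunk2 (l.drop i) := by
  induction k with
  | zero =>
    intro i l h
    rw [pvAGrp, List.drop_of_length_le (by omega), pvChunk2]
  | succ k ih =>
    intro i l h
    have h2 : i + 2 ≤ l.length := by omega
    have hdrop : l.drop i = l[i]'(by omega) :: l[i+1]'(by omega) :: l.drop (i + 2) :=
      pv_drop_two l i h2
    rw [pvAGrp, PySem.List.slice_natCast, hdrop, pvChunk2, ih (i + 2) l (by omega)]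
    congr 1
    have h22 : (i + 2) - i = 2 := by omega
    rw [h22]
    rfl

theorem message_to_digraphs_spec' (m : String) :
    message_to_digraphs m = message_to_digraphs_alt m := by
  rw [message_to_digraphs, message_to_digraphs_alt]
  rw [PySem.List.foldl_append_singleton_eq_map, List.nil_append]
  set chars := (m.toList.map (fun c => String.ofList [c])).filter (fun s => s ≠ " ") with hchars
  rw [pv_rmLoop_eq_filter _ _ (List.count_le_length), ← hchars]
  have hloop : pvAIns (chars.length / 2) 0 chars = pvBLoop chars (chars.length / 2) [] 0 := by
    have := pv_main_loop chars (chars.length / 2) [] 0 (by omega)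
    simpa using this
  rw [hloop]
  set out := pvBLoop chars (chars.length / 2) [] 0 with hout
  set out2 := if out.length % 2 == 1 then out ++ ["X"] else out with hout2
  have heven : out2.length % 2 = 0 := by
    rw [hout2]
    by_cases hpar : out.length % 2 = 1
    · rw [if_pos (by simpa using hpar)]; simp; omega
    · rw [if_neg (by simpa using hpar)]; omega
  have := pv_grp_eq_chunk (out2.length / 2) 0 out2 (by omega)
  simpa using this

-- ===== VERDICT (by name: the statement is the Claim_ definition above) =====
theorem message_to_digraphs_spec : Claim_equal_message_to_digraphs := by
  intro m _
  unfold Spec_message_to_digraphs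
  exact message_to_digraphs_spec' m
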